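-- pv_equiv track=rewrite | github.com/airbeeps/airbeeps | backend/airbeeps/rag/ingestion_runner.py | _infer_file_type
-- ===== SOURCE A (Python) =====
-- def _infer_file_type(filename: str | None, file_path: str) -> str:
--     """Infer file type from filename or path."""
--     name = (filename or file_path or "").lower()
--     ext_map = {
--         ".pdf": "pdf",
--         ".xlsx": "xlsx",
--         ".xls": "xls",
--         ".csv": "csv",
--         ".docx": "docx",
--         ".doc": "doc",
--         ".txt": "txt",
--         ".md": "md",
--     }
--     for ext, ftype in ext_map.items():
--         if name.endswith(ext):
--             return ftype
--     return "unknown"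
-- ===== SOURCE B (Python) =====
-- _KNOWN = {"pdf", "xlsx", "xls", "csv", "docx", "doc", "txt", "md"}
--
--
-- def _infer_file_type(filename, file_path):
--     """Infer file type: take the part after the last '.' and check it against the known set."""
--     name = (filename or file_path or "").lower()
--     dot = name.rfind(".")
--     if dot == -1:
--         return "unknown"
--     ext = name[dot + 1:]
--     return ext if ext in _KNOWN else "unknown"
-- ===== Notes on version B (the rewrite author's own statement) =====
-- stated objective: idiomatic
-- what changed: Replaces the 8-way endswith scan over a dict by locating the last '.' with rfind, slicing out the extension once, and testing it against a set of known extensions.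
import Mathlib
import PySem

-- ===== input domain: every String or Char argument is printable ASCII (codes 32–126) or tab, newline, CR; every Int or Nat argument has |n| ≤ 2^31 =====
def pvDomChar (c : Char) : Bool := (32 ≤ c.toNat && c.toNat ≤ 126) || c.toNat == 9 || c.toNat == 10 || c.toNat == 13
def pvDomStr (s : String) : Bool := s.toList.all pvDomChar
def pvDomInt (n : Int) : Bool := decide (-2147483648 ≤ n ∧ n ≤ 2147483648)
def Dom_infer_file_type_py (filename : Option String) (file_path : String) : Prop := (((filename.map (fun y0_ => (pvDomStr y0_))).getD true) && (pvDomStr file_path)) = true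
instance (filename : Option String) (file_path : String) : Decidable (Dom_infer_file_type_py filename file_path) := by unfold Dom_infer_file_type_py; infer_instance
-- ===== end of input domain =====

set_option maxRecDepth 4000
set_option maxHeartbeats 1000000


-- B replaces the endswith scan over the dict by rfind of the last '.', one slice and a set test;
-- same return value everywhere, both total.

-- ===== PORT A =====
-- the dict literal ext_map, as an association list in insertion order
def extMapA : List (String × String) :=
  [(".pdf", "pdf"), (".xlsx", "xlsx"), (".xls", "xls"), (".csv", "csv"),
   (".docx", "docx"), (".doc", "doc"), (".txt", "txt"), (".md", "md")]

-- the 'for ext, ftype in ext_map.items(): if name.endswith(ext): return ftype' loop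
def scanA (name : String) : List (String × String) → String
  | [] => "unknown"
  | (ext, ftype) :: rest => if PySem.Str.endswith name ext then ftype else scanA name rest

def infer_file_type_py (filename : Option String) (file_path : String) : String :=
  -- name = (filename or file_path or "").lower()
  let fst := match filename with
    | some s => if s ≠ "" then s else file_path
    | none => file_path
  let name := PySem.Str.lower (if fst ≠ "" then fst else "")
  scanA name extMapA

-- ===== PORT B =====
-- the set literal _KNOWN
def knownExts : PySem.Set String :=
  PySem.Set.ofList ["pdf", "xlsx", "xls", "csv", "docx", "doc", "txt", "md"]

def infer_file_type_py_alt (filename : Option String) (file_path : String) : String :=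
  let fst := match filename with
    | some s => if s ≠ "" then s else file_path
    | none => file_path
  let name := PySem.Str.lower (if fst ≠ "" then fst else "")
  -- dot = name.rfind("."); if dot == -1: return "unknown"
  let dot := PySem.Str.rfind name "."
  if dot = -1 then "unknown"
  else
    -- ext = name[dot + 1:]; return ext if ext in _KNOWN else "unknown"
    let ext := PySem.Str.slice name (some (dot + 1)) none
    if ext ∈ knownExts then ext else "unknown"

-- ===== PRECONDITION & SPEC =====
def Spec_infer_file_type_py (filename : Option String) (file_path : String) (out : String) : Prop := out = infer_file_type_py_alt filename file_path
instance (filename : Option String) (file_path : String) (out : String) : Decidable (Spec_infer_file_type_py filename file_path out) := by unfold Spec_infer_file_type_py; infer_instance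

-- ===== CLAIM (what is proved, stated in full; the proofs are below) =====
def Claim_equal_infer_file_type_py : Prop := ∀ (filename : Option String) (file_path : String), Dom_infer_file_type_py filename file_path → Spec_infer_file_type_py filename file_path (infer_file_type_py filename file_path)

-- ===== LEMMAS AND PROOFS =====

-- ['.'] is a prefix of l iff l starts with '.'
lemma dot_isPrefixOf (l : List Char) : ['.'].isPrefixOf l = true ↔ ∃ t, l = '.' :: t := by
  rw [List.isPrefixOf_iff_prefix]
  constructor
  · rintro ⟨t, ht⟩; exact ⟨t, ht.symm⟩
  · rintro ⟨t, rfl⟩; exact ⟨t, rfl⟩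

-- rfind.go returns -1 when no position ≤ k starts with the pattern
lemma go_none (s sub : List Char) (k : Nat)
    (h : ∀ j, j ≤ k → sub.isPrefixOf (s.drop j) = false) :
    PySem.Chars.rfind.go s sub k = -1 := by
  induction k with
  | zero =>
      have h0 := h 0 (le_refl 0)
      rw [List.drop_zero] at h0
      simp [PySem.Chars.rfind.go, h0]
  | succ j ih =>
      simp only [PySem.Chars.rfind.go]
      rw [h (j + 1) (le_refl _)]
      simp only [Bool.false_eq_true, if_false]
      exact ih (fun i hi => h i (Nat.le_succ_of_le hi))

-- rfind.go returns d when d ≤ k starts with the pattern and nothing above d up to k does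
lemma go_last (s sub : List Char) (d : Nat) (hd : sub.isPrefixOf (s.drop d) = true) :
    ∀ k, d ≤ k → (∀ j, d < j → j ≤ k → sub.isPrefixOf (s.drop j) = false) →
      PySem.Chars.rfind.go s sub k = (d : Int) := by
  intro k
  induction k with
  | zero =>
      intro hk _
      interval_cases d
      rw [List.drop_zero] at hd
      simp [PySem.Chars.rfind.go, hd]
  | succ j ih =>
      intro hk habove
      by_cases hdj : d = j + 1
      · subst hdj
        simp [PySem.Chars.rfind.go, hd]
      · have hd' : d ≤ j := Nat.lt_succ_iff.mp (lt_of_le_of_ne hk hdj)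
        simp only [PySem.Chars.rfind.go]
        rw [habove (j + 1) (Nat.lt_succ_of_le hd') (le_refl _)]
        simp only [Bool.false_eq_true, if_false]
        exact ih hd' (fun i hi hik => habove i hi (Nat.le_succ_of_le hik))

-- if '.' ∉ s then rfind s "." = -1
lemma rfind_no_dot (s : List Char) (hs : '.' ∉ s) : PySem.Chars.rfind s ['.'] = -1 := by
  unfold PySem.Chars.rfind
  apply go_none
  intro j _
  cases hp : ['.'].isPrefixOf (s.drop j)
  · rfl
  · exfalso
    rcases (dot_isPrefixOf _).mp hp with ⟨t, ht⟩
    have hmem : '.' ∈ s.drop j := by rw [ht]; exact List.mem_cons_self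
    exact hs (List.mem_of_mem_drop hmem)

-- if s = pre ++ '.'::suf with '.' ∉ suf (the LAST dot), rfind s "." = pre.length
lemma rfind_last_dot (pre suf : List Char) (hsuf : '.' ∉ suf) :
    PySem.Chars.rfind (pre ++ '.' :: suf) ['.'] = (pre.length : Int) := by
  unfold PySem.Chars.rfind
  apply go_last
  · apply (dot_isPrefixOf _).mpr
    exact ⟨suf, by simp⟩
  · simp only [List.length_append, List.length_cons]; omega
  · intro j hj _
    cases hp : ['.'].isPrefixOf ((pre ++ '.' :: suf).drop j)
    · rfl
    · exfalso
      rcases (dot_isPrefixOf _).mp hp with ⟨t, ht⟩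
      have hdrop : (pre ++ '.' :: suf).drop j = suf.drop (j - pre.length - 1) := by
        rw [List.drop_append]
        have h1 : pre.drop j = [] := List.drop_eq_nil_of_le (by omega)
        rw [h1, List.nil_append]
        have h2 : j - pre.length = (j - pre.length - 1) + 1 := by omega
        rw [h2, List.drop_succ_cons]
        simp
      rw [hdrop] at ht
      have hmem : '.' ∈ suf.drop (j - pre.length - 1) := by rw [ht]; exact List.mem_cons_self
      exact hsuf (List.mem_of_mem_drop hmem)

-- decomposition at the last '.'
lemma exists_last_dot (r : List Char) (hr : '.' ∈ r) :
    ∃ pre suf, r = pre ++ '.' :: suf ∧ '.' ∉ suf := by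
  induction r with
  | nil => cases hr
  | cons c rest ih =>
      by_cases hrest : '.' ∈ rest
      · rcases ih hrest with ⟨p, s, hps, hs⟩
        exact ⟨c :: p, s, by simp [hps], hs⟩
      · have hc : c = '.' := by
          rcases List.mem_cons.mp hr with h | h
          · exact h.symm
          · exact absurd h hrest
        exact ⟨[], rest, by simp [hc], hrest⟩

-- a dot-free tail q: '.'::q is a suffix of pre ++ '.'::suf ('.' ∉ suf) iff q = suf
lemma suffix_iff (q pre suf : List Char) (hq : '.' ∉ q) (hsuf : '.' ∉ suf) :
    (('.' :: q) <:+ (pre ++ '.' :: suf)) ↔ q = suf := by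
  induction pre with
  | nil =>
      rw [List.nil_append]
      constructor
      · rintro ⟨t, ht⟩
        cases t with
        | nil => simpa using ht
        | cons a t' =>
            exfalso
            rw [List.cons_append] at ht
            injection ht with h1 h2
            exact hsuf (h2 ▸ (by simp : ('.' : Char) ∈ t' ++ '.' :: q))
      · rintro rfl; exact List.suffix_refl _
  | cons b pre' ih =>
      rw [List.cons_append]
      constructor
      · rintro ⟨t, ht⟩
        cases t with
        | nil =>
            exfalso
            rw [List.nil_append] at ht
            injection ht with h1 h2
            exact hq (h2 ▸ (by simp : ('.' : Char) ∈ pre' ++ '.' :: suf))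
        | cons a t' =>
            rw [List.cons_append] at ht
            injection ht with h1 h2
            exact ih.mp ⟨t', h2⟩
      · intro h
        exact (ih.mpr h).trans (List.suffix_cons _ _)

-- each key ".v": endswith name ".v" decides the part after the last dot against v
lemma endswith_key (name : String) (pre suf : List Char)
    (hname : name.toList = pre ++ '.' :: suf) (hsuf : '.' ∉ suf)
    (k : String) (q : List Char) (hk : k.toList = '.' :: q) (hq : '.' ∉ q) :
    PySem.Str.endswith name k = decide (suf = q) := by
  rw [PySem.Str.endswith_eq]
  cases hd : decide (suf = q)
  · have hne : suf ≠ q := of_decide_eq_false hd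
    cases he : PySem.Chars.endswith name.toList k.toList
    · rfl
    · exfalso
      have := (PySem.Chars.endswith_iff _ _).mp he
      rw [hname, hk] at this
      exact hne ((suffix_iff q pre suf hq hsuf).mp this).symm
  · have heq : suf = q := of_decide_eq_true hd
    apply (PySem.Chars.endswith_iff _ _).mpr
    rw [hname, hk]
    exact (suffix_iff q pre suf hq hsuf).mpr heq.symm

-- endswith is false for a key containing '.' when name has no '.'
lemma endswith_no_dot (name : String) (hname : '.' ∉ name.toList)
    (k : String) (hk : '.' ∈ k.toList) : PySem.Str.endswith name k = false := by
  rw [PySem.Str.endswith_eq]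
  cases he : PySem.Chars.endswith name.toList k.toList
  · rfl
  · exact absurd (((PySem.Chars.endswith_iff _ _).mp he).subset hk) hname

lemma ofList_eq_iff (l : List Char) (s : String) : (String.ofList l = s) ↔ l = s.toList := by
  constructor
  · intro h; rw [← h, String.toList_ofList]
  · intro h; rw [h, String.ofList_toList]

-- the main fact: A's scan equals B's rfind/slice/set computation, for any name
lemma main_lemma (name : String) :
    scanA name extMapA =
      (if PySem.Str.rfind name "." = -1 then "unknown"
       else if PySem.Str.slice name (some (PySem.Str.rfind name "." + 1)) none ∈ knownExts
            then PySem.Str.slice name (some (PySem.Str.rfind name "." + 1)) none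
            else "unknown") := by
  have hrw : PySem.Str.rfind name "." = PySem.Chars.rfind name.toList ['.'] := by
    rw [PySem.Str.rfind_eq]; rfl
  by_cases hdot : '.' ∈ name.toList
  · rcases exists_last_dot _ hdot with ⟨pre, suf, hps, hsuf⟩
    have hr : PySem.Str.rfind name "." = (pre.length : Int) := by
      rw [hrw, hps]; exact rfind_last_dot pre suf hsuf
    have hne : ((pre.length : Int)) ≠ -1 := by omega
    rw [hr, if_neg hne]
    have hslice' : (PySem.Str.slice name (some ((pre.length : Int) + 1)) none).toList = suf := by
      rw [PySem.Str.toList_slice]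
      have hc : ((pre.length : Int) + 1) = ((pre.length + 1 : Nat) : Int) := by push_cast; ring
      rw [hc, PySem.Chars.slice_eq_listSlice, PySem.List.slice_from_natCast, hps]
      have hsplit : pre ++ '.' :: suf = (pre ++ ['.']) ++ suf := by simp
      have hlen : pre.length + 1 = (pre ++ ['.']).length := by simp
      rw [hsplit, hlen, List.drop_left]
    have hslice : PySem.Str.slice name (some ((pre.length : Int) + 1)) none = String.ofList suf := by
      rw [← hslice', String.ofList_toList]
    rw [hslice]
    have hk := endswith_key name pre suf hps hsuf
    simp only [scanA, extMapA]
    rw [hk ".pdf" "pdf".toList (by decide) (by decide),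
        hk ".xlsx" "xlsx".toList (by decide) (by decide),
        hk ".xls" "xls".toList (by decide) (by decide),
        hk ".csv" "csv".toList (by decide) (by decide),
        hk ".docx" "docx".toList (by decide) (by decide),
        hk ".doc" "doc".toList (by decide) (by decide),
        hk ".txt" "txt".toList (by decide) (by decide),
        hk ".md" "md".toList (by decide) (by decide)]
    have hmem : (String.ofList suf ∈ knownExts) ↔
        (suf = "pdf".toList ∨ suf = "xlsx".toList ∨ suf = "xls".toList ∨ suf = "csv".toList ∨
         suf = "docx".toList ∨ suf = "doc".toList ∨ suf = "txt".toList ∨ suf = "md".toList) := by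
      rw [knownExts, PySem.Set.mem_ofList]
      simp only [List.mem_cons, List.not_mem_nil, or_false, ofList_eq_iff]
    by_cases h1 : suf = "pdf".toList
    · subst h1; decide
    by_cases h2 : suf = "xlsx".toList
    · subst h2; decide
    by_cases h3 : suf = "xls".toList
    · subst h3; decide
    by_cases h4 : suf = "csv".toList
    · subst h4; decide
    by_cases h5 : suf = "docx".toList
    · subst h5; decide
    by_cases h6 : suf = "doc".toList
    · subst h6; decide
    by_cases h7 : suf = "txt".toList
    · subst h7; decide
    by_cases h8 : suf = "md".toList
    · subst h8; decide
    have hnm : ¬ (String.ofList suf ∈ knownExts) := fun h => by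
      rcases hmem.mp h with h' | h' | h' | h' | h' | h' | h' | h'
      exacts [h1 h', h2 h', h3 h', h4 h', h5 h', h6 h', h7 h', h8 h']
    have e : ∀ (l : List Char), ¬ suf = l → ((decide (suf = l) = true) = False) := by
      intro l hl; simp [hl]
    simp only [e _ h1, e _ h2, e _ h3, e _ h4, e _ h5, e _ h6, e _ h7, e _ h8, if_false]
    rw [if_neg hnm]
  · have hr : PySem.Str.rfind name "." = -1 := by
      rw [hrw]; exact rfind_no_dot _ hdot
    rw [hr, if_pos rfl]
    simp only [scanA, extMapA]
    rw [endswith_no_dot name hdot ".pdf" (by decide),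
        endswith_no_dot name hdot ".xlsx" (by decide),
        endswith_no_dot name hdot ".xls" (by decide),
        endswith_no_dot name hdot ".csv" (by decide),
        endswith_no_dot name hdot ".docx" (by decide),
        endswith_no_dot name hdot ".doc" (by decide),
        endswith_no_dot name hdot ".txt" (by decide),
        endswith_no_dot name hdot ".md" (by decide)]
    rfl

-- ===== VERDICT (by name: the statement is the Claim_ definition above) =====
theorem infer_file_type_py_spec : Claim_equal_infer_file_type_py := by
  intro filename file_path _
  unfold Spec_infer_file_type_py infer_file_type_py infer_file_type_py_alt
  exact main_lemma _
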